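-- pv_equiv track=rewrite | github.com/powerlego/Year-1 | Homework/double_add_5.py | find_end_iter
-- ===== SOURCE A (Python) =====
-- def find_end_iter(start, count):
--     # Iteratively finds the value for the sequence and returns said value
--     n = count
--     while count <= n:
--         """if statements to end the loop as to not let it go on into infinity, also a defensive if statement is added
--         to make sure count >= 0"""
--         if count < 0:
--             break
--         elif count == 0:
--             break
--         else:
--             count = count - 1
--             start = (start * 2) + 5
--     return start
-- ===== SOURCE B (Python) =====
-- def find_end_iter(start, count):
--     # Closed form: after count steps of x -> 2*x + 5, value is start*2^count + 5*(2^count - 1).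
--     if count <= 0:
--         return start
--     p = pow(2, count)
--     return start * p + 5 * (p - 1)
-- ===== Notes on version B (the rewrite author's own statement) =====
-- stated objective: faster
-- what changed: Replaced the count-step iteration of x -> 2*x+5 by the closed form start*2^count + 5*(2^count-1) computed with built-in fast pow; intended as faster (O(log count) multiplications vs O(count)); measured 1279x at n=65536, the largest size both finished.
import Mathlib
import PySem

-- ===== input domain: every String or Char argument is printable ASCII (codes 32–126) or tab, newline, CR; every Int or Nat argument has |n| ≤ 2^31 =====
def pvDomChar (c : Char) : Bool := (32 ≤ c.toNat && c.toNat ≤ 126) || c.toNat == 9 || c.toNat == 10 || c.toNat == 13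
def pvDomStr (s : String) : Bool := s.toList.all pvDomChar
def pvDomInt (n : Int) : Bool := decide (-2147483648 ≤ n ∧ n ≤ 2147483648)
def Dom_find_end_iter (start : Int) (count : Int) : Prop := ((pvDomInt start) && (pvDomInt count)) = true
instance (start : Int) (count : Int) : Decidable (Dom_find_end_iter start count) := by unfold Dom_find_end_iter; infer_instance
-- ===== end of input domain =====

-- B replaces the count-step iteration of x -> 2*x+5 by the closed form start*2^count + 5*(2^count-1); intended as faster, measured 1279x at n=65536 (the largest size both programs finished).


-- ===== PORT A =====
-- the while loop of A: state (start, count), n fixed; branches in source order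
def findEndLoop (start : Int) (count : Int) (n : Int) : Int :=
  if count ≤ n then
    if count < 0 then start
    else if count = 0 then start
    else findEndLoop (start * 2 + 5) (count - 1) n
  else start
termination_by count.toNat
decreasing_by
  have h1 : ¬ count < 0 := by assumption
  have h2 : ¬ count = 0 := by assumption
  omega

def find_end_iter (start : Int) (count : Int) : Int :=
  findEndLoop start count count

-- ===== PORT B =====
def find_end_iter_alt (start : Int) (count : Int) : Int :=
  if count ≤ 0 then start
  else
    let p : Int := 2 ^ count.toNat
    start * p + 5 * (p - 1)

-- ===== PRECONDITION & SPEC =====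
def Spec_find_end_iter (start : Int) (count : Int) (out : Int) : Prop := out = find_end_iter_alt start count
instance (start : Int) (count : Int) (out : Int) : Decidable (Spec_find_end_iter start count out) := by unfold Spec_find_end_iter; infer_instance

-- ===== CLAIM (what is proved, stated in full; the proofs are below) =====
def Claim_equal_find_end_iter : Prop := ∀ (start : Int) (count : Int), Dom_find_end_iter start count → Spec_find_end_iter start count (find_end_iter start count)

-- ===== LEMMAS AND PROOFS =====
theorem findEndLoop_closed (k : Nat) : ∀ (start count n : Int), 0 < count → count ≤ n →
    count.toNat = k → findEndLoop start count n = start * 2 ^ k + 5 * (2 ^ k - 1) := by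
  induction k with
  | zero => intro start count n hpos _ hk; omega
  | succ k ih =>
    intro start count n hpos hle hk
    rw [findEndLoop, if_pos hle, if_neg (by omega : ¬ count < 0),
        if_neg (by omega : ¬ count = 0)]
    by_cases hc1 : count - 1 = 0
    · have hk0 : k = 0 := by omega
      subst hk0
      rw [findEndLoop, if_pos (by omega : count - 1 ≤ n), if_neg (by omega : ¬ count - 1 < 0),
          if_pos hc1]
      ring
    · rw [ih (start * 2 + 5) (count - 1) n (by omega) (by omega) (by omega), pow_succ]
      ring

theorem find_end_iter_spec : Claim_equal_find_end_iter := by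
  intro start count _
  unfold Spec_find_end_iter find_end_iter find_end_iter_alt
  by_cases h : count ≤ 0
  · rw [findEndLoop]
    rcases (by omega : count < 0 ∨ count = 0) with hc | hc
    · simp [le_refl, hc, h, show ¬ count = 0 by omega]
    · subst hc; simp
  · rw [findEndLoop_closed count.toNat start count count (by omega) le_rfl rfl]
    simp [h]
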